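-- pv_equiv track=rewrite | github.com/TrevorBivi/RustFishingBot | humanInput.py | destination
-- ===== SOURCE A (Python) =====
-- def destination(action):
--     x = 0
--     y = 0
--     t = 0
--     for a in action:
--         x += a[0]
--         y += a[1]
--         t += a[2]
--     return x,y,t
-- ===== SOURCE B (Python) =====
-- def destination(action):
--     action = list(action)
--     x = sum(a[0] for a in action)
--     y = sum(a[1] for a in action)
--     t = sum(a[2] for a in action)
--     return x, y, t
-- ===== Notes on version B (the rewrite author's own statement) =====
-- stated objective: alternative
-- what changed: Replaces A's single-pass loop threading three scalar accumulators with three staged passes, each summing one component with sum(); the list is materialized once so each pass is independent.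
import Mathlib
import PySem

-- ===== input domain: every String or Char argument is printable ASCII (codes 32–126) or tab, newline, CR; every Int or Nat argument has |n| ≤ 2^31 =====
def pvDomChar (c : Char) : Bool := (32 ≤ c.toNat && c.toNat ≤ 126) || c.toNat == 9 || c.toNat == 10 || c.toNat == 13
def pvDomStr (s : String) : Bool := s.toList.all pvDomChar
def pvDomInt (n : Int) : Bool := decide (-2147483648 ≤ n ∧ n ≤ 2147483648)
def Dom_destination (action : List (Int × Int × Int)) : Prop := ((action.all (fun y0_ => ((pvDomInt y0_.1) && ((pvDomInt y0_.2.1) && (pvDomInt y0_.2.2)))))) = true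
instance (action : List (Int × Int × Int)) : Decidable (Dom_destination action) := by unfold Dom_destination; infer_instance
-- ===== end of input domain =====

-- B computes each coordinate by its own staged sum() pass instead of A's single loop threading three accumulators (alternative decomposition; same cost).

-- ===== PORT A =====
-- A: x,y,t updated in one for-loop; ported as structural recursion threading the three scalars.
def destinationLoop (action : List (Int × Int × Int)) (x y t : Int) : Int × Int × Int :=
  match action with
  | [] => (x, y, t)
  | a :: rest => destinationLoop rest (x + a.1) (y + a.2.1) (t + a.2.2)

def destination (action : List (Int × Int × Int)) : Int × Int × Int :=
  destinationLoop action 0 0 0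

-- ===== PORT B =====
-- B: three independent passes, sum of one projected component each (sum(gen) → (map …).sum).
def destination_alt (action : List (Int × Int × Int)) : Int × Int × Int :=
  ((action.map (fun a => a.1)).sum,
   (action.map (fun a => a.2.1)).sum,
   (action.map (fun a => a.2.2)).sum)

-- ===== PRECONDITION & SPEC =====
def Spec_destination (action : List (Int × Int × Int)) (out : Int × Int × Int) : Prop := out = destination_alt action
instance (action : List (Int × Int × Int)) (out : Int × Int × Int) : Decidable (Spec_destination action out) := by unfold Spec_destination; infer_instance

-- ===== CLAIM (what is proved, stated in full; the proofs are below) =====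
def Claim_equal_destination : Prop := ∀ (action : List (Int × Int × Int)), Dom_destination action → Spec_destination action (destination action)

-- ===== LEMMAS AND PROOFS =====
theorem destinationLoop_eq (action : List (Int × Int × Int)) (x y t : Int) :
    destinationLoop action x y t =
      (x + (action.map (fun a => a.1)).sum,
       y + (action.map (fun a => a.2.1)).sum,
       t + (action.map (fun a => a.2.2)).sum) := by
  induction action generalizing x y t with
  | nil => simp [destinationLoop]
  | cons a rest ih =>
    simp [destinationLoop, ih]
    refine ⟨by ring, by ring, by ring⟩

-- ===== VERDICT (by name: the statement is the Claim_ definition above) =====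
theorem destination_spec : Claim_equal_destination := by
  intro action _
  unfold Spec_destination destination destination_alt
  simp [destinationLoop_eq]
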